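-- pv_equiv track=rewrite | github.com/FT-Labs/BaslangictanIleriSeviyeyePythonUdemy | Bolum5/MastermindOyunu/Mastermind.py | yanlisYerHesapla
-- ===== SOURCE A (Python) =====
-- def yanlisYerHesapla(dogruYerCikartilmisOyuncuSecret , dogruYerCikartilmisSecret):
--
--     oyuncuSecretSozluk = {"A" : 0 , "B" : 0 , "C" : 0 , "D" : 0 , "E" : 0 , "F" : 0}
--     secretSozluk = oyuncuSecretSozluk.copy()
--
--     for karakter in dogruYerCikartilmisSecret:
--         if karakter in secretSozluk.keys():
--             secretSozluk[karakter] += 1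
--
--     for karakter in dogruYerCikartilmisOyuncuSecret:
--         if karakter in oyuncuSecretSozluk.keys():
--             oyuncuSecretSozluk[karakter] += 1
--
--     yanlisYer = 0
--
--     for key in oyuncuSecretSozluk.keys():
--         yanlisYer += min(oyuncuSecretSozluk[key] , secretSozluk[key])
--
--     return yanlisYer
-- ===== SOURCE B (Python) =====
-- RENKLER = ("A", "B", "C", "D", "E", "F")
--
-- def yanlisYerHesapla(dogruYerCikartilmisOyuncuSecret, dogruYerCikartilmisSecret):
--     # Greedy cancellation: keep the secret's (color) pegs as a pool and cross
--     # one off for every matching peg of the player's guess.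
--     kalan = [k for k in dogruYerCikartilmisSecret if k in RENKLER]
--     yanlisYer = 0
--     for k in dogruYerCikartilmisOyuncuSecret:
--         if k in RENKLER and k in kalan:
--             kalan.remove(k)
--             yanlisYer += 1
--     return yanlisYer
-- ===== Notes on version B (the rewrite author's own statement) =====
-- stated objective: alternative
-- what changed: Replaces A's two count dictionaries and the min-per-key sum by a greedy pairing: B keeps the secret's color pegs as a remaining pool and removes one matching peg for each player peg, counting successful removals.
import Mathlib
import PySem

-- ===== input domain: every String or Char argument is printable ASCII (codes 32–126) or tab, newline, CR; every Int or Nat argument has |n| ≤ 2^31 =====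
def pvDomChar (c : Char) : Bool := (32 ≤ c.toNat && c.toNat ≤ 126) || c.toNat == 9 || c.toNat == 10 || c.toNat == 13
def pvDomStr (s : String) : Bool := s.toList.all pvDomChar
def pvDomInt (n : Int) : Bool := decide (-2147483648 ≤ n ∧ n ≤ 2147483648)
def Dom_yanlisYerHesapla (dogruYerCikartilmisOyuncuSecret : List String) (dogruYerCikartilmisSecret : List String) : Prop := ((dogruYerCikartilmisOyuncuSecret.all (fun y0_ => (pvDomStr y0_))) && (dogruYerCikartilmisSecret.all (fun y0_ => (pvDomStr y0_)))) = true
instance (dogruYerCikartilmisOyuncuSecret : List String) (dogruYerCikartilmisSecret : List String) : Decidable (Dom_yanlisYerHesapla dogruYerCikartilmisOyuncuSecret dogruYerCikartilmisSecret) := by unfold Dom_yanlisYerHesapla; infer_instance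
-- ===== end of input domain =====

-- B replaces A's two count dictionaries and min-per-key sum by greedy pairing
-- against a remaining pool of secret pegs (objective: alternative).

-- ===== PORT A =====
-- the count-up step 'if karakter in d.keys(): d[karakter] += 1'
def pvStepA (d : PySem.Dict String Int) (karakter : String) : PySem.Dict String Int :=
  if d.contains karakter then d.insert karakter (d.getD karakter 0 + 1) else d

def yanlisYerHesapla (dogruYerCikartilmisOyuncuSecret : List String) (dogruYerCikartilmisSecret : List String) : Int :=
  let oyuncuSecretSozluk : PySem.Dict String Int :=
    PySem.Dict.ofList [("A", 0), ("B", 0), ("C", 0), ("D", 0), ("E", 0), ("F", 0)]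
  let secretSozluk := oyuncuSecretSozluk
  let secretSozluk := dogruYerCikartilmisSecret.foldl pvStepA secretSozluk
  let oyuncuSecretSozluk := dogruYerCikartilmisOyuncuSecret.foldl pvStepA oyuncuSecretSozluk
  let yanlisYer : Int := 0
  oyuncuSecretSozluk.keys.foldl
    (fun yanlisYer key => yanlisYer + min (oyuncuSecretSozluk.getD key 0) (secretSozluk.getD key 0))
    yanlisYer

-- ===== PORT B =====
def pvRenkler : List String := ["A", "B", "C", "D", "E", "F"]

-- the loop 'for k in …: if k in RENKLER and k in kalan: kalan.remove(k); yanlisYer += 1'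
-- (kalan.remove(k) is guarded by 'k in kalan', so remove? is always some there)
def pvLoopB : List String → List String × Int → List String × Int
  | [], st => st
  | k :: rest, st =>
    if pvRenkler.contains k && st.1.contains k then
      pvLoopB rest ((PySem.List.remove? st.1 k).getD st.1, st.2 + 1)
    else
      pvLoopB rest st

def yanlisYerHesapla_alt (dogruYerCikartilmisOyuncuSecret : List String) (dogruYerCikartilmisSecret : List String) : Int :=
  let kalan := dogruYerCikartilmisSecret.filter (fun k => pvRenkler.contains k)
  (pvLoopB dogruYerCikartilmisOyuncuSecret (kalan, 0)).2

-- ===== PRECONDITION & SPEC =====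
def Spec_yanlisYerHesapla (dogruYerCikartilmisOyuncuSecret : List String) (dogruYerCikartilmisSecret : List String) (out : Int) : Prop := out = yanlisYerHesapla_alt dogruYerCikartilmisOyuncuSecret dogruYerCikartilmisSecret
instance (dogruYerCikartilmisOyuncuSecret : List String) (dogruYerCikartilmisSecret : List String) (out : Int) : Decidable (Spec_yanlisYerHesapla dogruYerCikartilmisOyuncuSecret dogruYerCikartilmisSecret out) := by unfold Spec_yanlisYerHesapla; infer_instance

-- ===== CLAIM (what is proved, stated in full; the proofs are below) =====
def Claim_equal_yanlisYerHesapla : Prop := ∀ (dogruYerCikartilmisOyuncuSecret : List String) (dogruYerCikartilmisSecret : List String), Dom_yanlisYerHesapla dogruYerCikartilmisOyuncuSecret dogruYerCikartilmisSecret → Spec_yanlisYerHesapla dogruYerCikartilmisOyuncuSecret dogruYerCikartilmisSecret (yanlisYerHesapla dogruYerCikartilmisOyuncuSecret dogruYerCikartilmisSecret)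

-- ===== LEMMAS AND PROOFS =====

-- the sum of min-counts that both programs compute, over a list of keys
def pvS (cs oy kalan : List String) : Int :=
  (cs.map (fun c => min ((oy.count c : Int)) ((kalan.count c : Int)))).sum

-- a sum over a nodup list where exactly the entry at k drops by 1
theorem sum_map_pred_at (cs : List String) (f g : String → Int) (k : String)
    (hnd : cs.Nodup) (hk : k ∈ cs)
    (hne : ∀ c ∈ cs, c ≠ k → f c = g c) (hfk : f k = g k + 1) :
    (cs.map f).sum = (cs.map g).sum + 1 := by
  induction cs with
  | nil => cases hk
  | cons x cs ih =>
    rcases List.mem_cons.mp hk with rfl | hk'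
    · have : ∀ c ∈ cs, f c = g c := fun c hc =>
        hne c (List.mem_cons_of_mem _ hc) (fun h => (List.nodup_cons.mp hnd).1 (h ▸ hc))
      simp [List.map_congr_left this, hfk]
      ring_nf
    · have hxk : x ≠ k := fun h => (List.nodup_cons.mp hnd).1 (h ▸ hk')
      rw [List.map_cons, List.map_cons, List.sum_cons, List.sum_cons,
        hne x (List.mem_cons_self) hxk,
        ih (List.nodup_cons.mp hnd).2 hk'
          (fun c hc => hne c (List.mem_cons_of_mem _ hc)) ]
      ring

-- the greedy cancellation loop computes the min-count sum
theorem pvLoopB_eq_sum (oy : List String) : ∀ (kalan : List String) (acc : Int),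
    (pvLoopB oy (kalan, acc)).2 = acc + pvS pvRenkler oy kalan := by
  induction oy with
  | nil =>
    intro kalan acc
    simp [pvLoopB, pvS]
  | cons k oy ih =>
    intro kalan acc
    by_cases hkr : k ∈ pvRenkler
    · by_cases hkk : k ∈ kalan
      · rw [show pvLoopB (k :: oy) (kalan, acc)
              = pvLoopB oy ((PySem.List.remove? kalan k).getD kalan, acc + 1) from by
            simp [pvLoopB, hkr, hkk]]
        rw [PySem.List.remove?_eq_some_erase _ _ hkk, Option.getD_some, ih]
        have hsum : pvS pvRenkler (k :: oy) kalan = pvS pvRenkler oy (kalan.erase k) + 1 := by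
          unfold pvS
          refine sum_map_pred_at _ _ _ k (by decide) hkr ?_ ?_
          · intro c _ hck
            rw [List.count_cons_of_ne (Ne.symm hck), List.count_erase_of_ne hck]
          · have h1 : 1 ≤ kalan.count k := List.one_le_count_iff.mpr hkk
            rw [List.count_cons_self, List.count_erase_self]
            push_cast [h1]
            omega
        rw [hsum]; ring
      · rw [show pvLoopB (k :: oy) (kalan, acc) = pvLoopB oy (kalan, acc) from by
            simp [pvLoopB, hkk]]
        rw [ih]
        have hcnt : kalan.count k = 0 := List.count_eq_zero.mpr hkk
        have hsum : pvS pvRenkler (k :: oy) kalan = pvS pvRenkler oy kalan := by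
          unfold pvS
          refine congrArg _ (List.map_congr_left ?_)
          intro c hc
          by_cases hck : c = k
          · subst hck
            rw [List.count_cons_self, hcnt]
            simp
            omega
          · rw [List.count_cons_of_ne (Ne.symm hck)]
        rw [hsum]
    · rw [show pvLoopB (k :: oy) (kalan, acc) = pvLoopB oy (kalan, acc) from by
          simp [pvLoopB, hkr]]
      rw [ih]
      have hsum : pvS pvRenkler (k :: oy) kalan = pvS pvRenkler oy kalan := by
        unfold pvS
        refine congrArg _ (List.map_congr_left ?_)
        intro c hc
        have : c ≠ k := fun h => hkr (h ▸ hc)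
        rw [List.count_cons_of_ne (Ne.symm this)]
      rw [hsum]

-- filtering the pool to the alphabet does not change alphabet counts
theorem pvS_filter (oy b : List String) :
    pvS pvRenkler oy (b.filter (fun k => pvRenkler.contains k)) = pvS pvRenkler oy b := by
  unfold pvS
  refine congrArg _ (List.map_congr_left ?_)
  intro c hc
  rw [List.count_filter]
  simp [hc]

-- A-side: the guarded count-up loop never changes the key set
theorem keys_foldl_pvStepA (l : List String) (d : PySem.Dict String Int) :
    (l.foldl pvStepA d).keys = d.keys := by
  induction l generalizing d with
  | nil => rfl
  | cons x l ih =>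
    simp only [List.foldl_cons, pvStepA]
    by_cases h : d.contains x = true
    · rw [if_pos h, ih, PySem.Dict.keys_insert_of_contains _ _ h]
    · rw [if_neg h, ih]

-- A-side: for a key already present, the guarded loop adds exactly its count
theorem getD_foldl_pvStepA (l : List String) (d : PySem.Dict String Int) (v : String)
    (hv : d.contains v = true) :
    (l.foldl pvStepA d).getD v 0 = d.getD v 0 + (l.count v : Int) := by
  induction l generalizing d with
  | nil => simp
  | cons x l ih =>
    simp only [List.foldl_cons, pvStepA]
    by_cases h : d.contains x = true
    · have hc : (d.insert x (d.getD x 0 + 1)).contains v = true := by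
        simp [PySem.Dict.contains_insert, hv]
      rw [if_pos h, ih _ hc, PySem.Dict.getD_insert]
      by_cases hxv : v = x
      · subst hxv
        rw [if_pos rfl, List.count_cons_self]
        push_cast
        ring
      · rw [if_neg hxv, List.count_cons_of_ne (Ne.symm hxv)]
    · have hvx : v ≠ x := by rintro rfl; exact h hv
      rw [if_neg h, ih _ hv, List.count_cons_of_ne (Ne.symm hvx)]

-- ===== VERDICT (by name: the statement is the Claim_ definition above) =====
theorem yanlisYerHesapla_spec : Claim_equal_yanlisYerHesapla := by
  intro a b _
  show yanlisYerHesapla a b = yanlisYerHesapla_alt a b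
  unfold yanlisYerHesapla yanlisYerHesapla_alt
  simp only [keys_foldl_pvStepA]
  rw [show (PySem.Dict.ofList [("A", (0:Int)), ("B", 0), ("C", 0), ("D", 0), ("E", 0), ("F", 0)]).keys
        = ["A", "B", "C", "D", "E", "F"] from by decide]
  simp only [List.foldl_cons, List.foldl_nil]
  rw [getD_foldl_pvStepA a _ "A" (by decide), getD_foldl_pvStepA b _ "A" (by decide),
      getD_foldl_pvStepA a _ "B" (by decide), getD_foldl_pvStepA b _ "B" (by decide),
      getD_foldl_pvStepA a _ "C" (by decide), getD_foldl_pvStepA b _ "C" (by decide),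
      getD_foldl_pvStepA a _ "D" (by decide), getD_foldl_pvStepA b _ "D" (by decide),
      getD_foldl_pvStepA a _ "E" (by decide), getD_foldl_pvStepA b _ "E" (by decide),
      getD_foldl_pvStepA a _ "F" (by decide), getD_foldl_pvStepA b _ "F" (by decide)]
  rw [pvLoopB_eq_sum, pvS_filter]
  unfold pvS pvRenkler
  simp only [List.map_cons, List.map_nil, List.sum_cons, List.sum_nil]
  rw [show (PySem.Dict.ofList [("A", (0:Int)), ("B", 0), ("C", 0), ("D", 0), ("E", 0), ("F", 0)]).getD "A" 0 = 0 from by decide,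
      show (PySem.Dict.ofList [("A", (0:Int)), ("B", 0), ("C", 0), ("D", 0), ("E", 0), ("F", 0)]).getD "B" 0 = 0 from by decide,
      show (PySem.Dict.ofList [("A", (0:Int)), ("B", 0), ("C", 0), ("D", 0), ("E", 0), ("F", 0)]).getD "C" 0 = 0 from by decide,
      show (PySem.Dict.ofList [("A", (0:Int)), ("B", 0), ("C", 0), ("D", 0), ("E", 0), ("F", 0)]).getD "D" 0 = 0 from by decide,
      show (PySem.Dict.ofList [("A", (0:Int)), ("B", 0), ("C", 0), ("D", 0), ("E", 0), ("F", 0)]).getD "E" 0 = 0 from by decide,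
      show (PySem.Dict.ofList [("A", (0:Int)), ("B", 0), ("C", 0), ("D", 0), ("E", 0), ("F", 0)]).getD "F" 0 = 0 from by decide]
  ring_nf
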